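-- pv_equiv track=rewrite | github.com/gluon/AbletonLive9_RemoteScripts | Nocturn2/SceneController.py | transpose_notes
-- ===== SOURCE A (Python) =====
-- def transpose_notes(selection, trans):
--     notes = list()
--     for note in selection:
--         pitch = note[0]+trans
--         if ((pitch > 127) or (pitch < 0)):
--             return ()
--         else:
--             notes.append((pitch, note[1], note[2], note[3], note[4]))
--     return tuple(notes)
-- ===== SOURCE B (Python) =====
-- def transpose_notes(selection, trans):
--     if selection:
--         pitches = [note[0] for note in selection]
--         if max(pitches) + trans > 127 or min(pitches) + trans < 0:
--             return ()
--     return tuple((note[0] + trans, note[1], note[2], note[3], note[4]) for note in selection)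
-- ===== Notes on version B (the rewrite author's own statement) =====
-- stated objective: alternative
-- what changed: A walks the notes once, transposing and range-checking each pitch with an early return; B instead validates the whole batch by its extremes -- it computes max and min of the original pitches and rejects iff max+trans > 127 or min+trans < 0 -- and only then maps the transposition over the selection, with no per-note check.
import Mathlib
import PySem

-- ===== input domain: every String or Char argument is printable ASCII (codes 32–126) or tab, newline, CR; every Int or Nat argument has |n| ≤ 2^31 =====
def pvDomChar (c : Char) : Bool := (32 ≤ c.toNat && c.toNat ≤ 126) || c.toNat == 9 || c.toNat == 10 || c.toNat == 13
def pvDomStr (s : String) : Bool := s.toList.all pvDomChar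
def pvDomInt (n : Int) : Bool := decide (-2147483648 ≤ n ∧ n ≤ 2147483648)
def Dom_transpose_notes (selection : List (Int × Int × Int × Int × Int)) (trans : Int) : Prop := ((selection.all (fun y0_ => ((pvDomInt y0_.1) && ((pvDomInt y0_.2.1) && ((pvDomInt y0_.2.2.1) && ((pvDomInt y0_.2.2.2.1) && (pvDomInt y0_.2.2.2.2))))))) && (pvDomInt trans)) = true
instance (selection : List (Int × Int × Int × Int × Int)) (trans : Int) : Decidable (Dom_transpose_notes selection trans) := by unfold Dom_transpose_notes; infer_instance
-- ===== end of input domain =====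

-- B validates the batch by its pitch extremes (max/min + trans against the MIDI range) and then maps the transposition, instead of A's per-note check with early return; objective: alternative algorithm, same cost.
-- ===== PORT A =====
def transposeLoopA (trans : Int) : List (Int × Int × Int × Int × Int) → List (Int × Int × Int × Int × Int) → List (Int × Int × Int × Int × Int)
  | [], notes => notes
  | note :: rest, notes =>
    let pitch := note.1 + trans
    if pitch > 127 ∨ pitch < 0 then []
    else transposeLoopA trans rest (notes ++ [(pitch, note.2.1, note.2.2.1, note.2.2.2.1, note.2.2.2.2)])

def transpose_notes (selection : List (Int × Int × Int × Int × Int)) (trans : Int) : List (Int × Int × Int × Int × Int) :=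
  transposeLoopA trans selection []

-- ===== PORT B =====
def transpose_notes_alt (selection : List (Int × Int × Int × Int × Int)) (trans : Int) : List (Int × Int × Int × Int × Int) :=
  let bad : Bool :=
    if selection.isEmpty then false
    else
      let pitches := selection.map (fun note => note.1)
      match PySem.List.max? pitches (fun x => x), PySem.List.min? pitches (fun x => x) with
      | some mx, some mn => mx + trans > 127 || mn + trans < 0
      | _, _ => false
  if bad then []
  else selection.map (fun note => (note.1 + trans, note.2.1, note.2.2.1, note.2.2.2.1, note.2.2.2.2))

-- ===== PRECONDITION & SPEC =====
def Spec_transpose_notes (selection : List (Int × Int × Int × Int × Int)) (trans : Int) (out : List (Int × Int × Int × Int × Int)) : Prop := out = transpose_notes_alt selection trans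
instance (selection : List (Int × Int × Int × Int × Int)) (trans : Int) (out : List (Int × Int × Int × Int × Int)) : Decidable (Spec_transpose_notes selection trans out) := by unfold Spec_transpose_notes; infer_instance

-- ===== CLAIM (what is proved, stated in full; the proofs are below) =====
def Claim_equal_transpose_notes : Prop := ∀ (selection : List (Int × Int × Int × Int × Int)) (trans : Int), Dom_transpose_notes selection trans → Spec_transpose_notes selection trans (transpose_notes selection trans)

-- ===== LEMMAS AND PROOFS =====
lemma transposeLoopA_eq (trans : Int) (sel acc : List (Int × Int × Int × Int × Int)) :
    transposeLoopA trans sel acc =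
      (if ∃ note ∈ sel, note.1 + trans > 127 ∨ note.1 + trans < 0 then []
       else acc ++ sel.map (fun note => (note.1 + trans, note.2.1, note.2.2.1, note.2.2.2.1, note.2.2.2.2))) := by
  induction sel generalizing acc with
  | nil => simp [transposeLoopA]
  | cons note rest ih =>
    simp only [transposeLoopA, List.exists_mem_cons_iff]
    by_cases h : note.1 + trans > 127 ∨ note.1 + trans < 0
    · simp [h]
    · rw [if_neg h, ih]
      by_cases hr : ∃ n ∈ rest, n.1 + trans > 127 ∨ n.1 + trans < 0
      · simp [h, hr]
      · simp [h, hr]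

lemma exists_bad_iff (sel : List (Int × Int × Int × Int × Int)) (trans : Int)
    (mx mn : Int)
    (hmx : PySem.List.max? (sel.map (fun note => note.1)) (fun x => x) = some mx)
    (hmn : PySem.List.min? (sel.map (fun note => note.1)) (fun x => x) = some mn) :
    (∃ note ∈ sel, note.1 + trans > 127 ∨ note.1 + trans < 0) ↔ (mx + trans > 127 ∨ mn + trans < 0) := by
  constructor
  · rintro ⟨note, hmem, hv⟩
    have hp : note.1 ∈ sel.map (fun note => note.1) := List.mem_map_of_mem hmem
    rcases hv with hv | hv
    · exact Or.inl (by have := PySem.List.max?_isMax hmx _ hp; omega)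
    · exact Or.inr (by have := PySem.List.min?_isMin hmn _ hp; omega)
  · intro hv
    rcases hv with hv | hv
    · obtain ⟨note, hmem, hq⟩ := List.mem_map.mp (PySem.List.max?_mem hmx)
      exact ⟨note, hmem, Or.inl (by omega)⟩
    · obtain ⟨note, hmem, hq⟩ := List.mem_map.mp (PySem.List.min?_mem hmn)
      exact ⟨note, hmem, Or.inr (by omega)⟩

-- ===== VERDICT (by name: the statement is the Claim_ definition above) =====
theorem transpose_notes_spec : Claim_equal_transpose_notes := by
  intro selection trans _
  unfold Spec_transpose_notes transpose_notes transpose_notes_alt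
  rw [transposeLoopA_eq]
  cases selection with
  | nil => simp
  | cons x rest =>
    have hmx : PySem.List.max? ((x :: rest).map (fun note => note.1)) (fun y => y)
        = some ((rest.map (fun note => note.1)).foldl max x.1) := by
      simp [PySem.List.max?_id_cons]
    have hmn : PySem.List.min? ((x :: rest).map (fun note => note.1)) (fun y => y)
        = some ((rest.map (fun note => note.1)).foldl min x.1) := by
      simp [PySem.List.min?_id_cons]
    have hiff := exists_bad_iff (x :: rest) trans _ _ hmx hmn
    simp only [List.map_cons] at hmx hmn ⊢
    simp only [hiff]
    rw [hmx, hmn]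
    simp
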